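-- pv_equiv track=rewrite | github.com/daniel-reich/turbo-robot | YDgtdP69Mn9pC73xN_3.py | num_grid
-- ===== SOURCE A (Python) =====
-- from collections import defaultdict
-- from collections import defaultdict
--
-- def num_grid(lst):
--     d = defaultdict(int)
--     check = []
--     for r in range(len(lst)):
--         for c in range(len(lst[0])):
--             if lst[r][c] == '#':
--                 check.append((r,c))
--     for m in range(len(lst)):
--         for n in range(len(lst[0])):
--             for t in check:
--                 if (abs(m-t[0]) <= 1 and abs(n-t[1]) <=1
--                     and (m,n) != t):
--                     d[(m,n)] += 1
--     grid = lst.copy()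
--     for i in d:
--         grid[i[0]][i[1]] = str(d[i])
--     for a in range(len(grid)):
--         for b in range(len(grid[0])):
--             if grid[a][b] == '-':
--                 grid[a][b] ='0'
--         for g in check:
--             grid[g[0]][g[1]] = '#'
--     return grid
-- ===== SOURCE B (Python) =====
-- def num_grid(lst):
--     rows = len(lst)
--     cols = len(lst[0]) if lst else 0
--     out = []
--     for r, row in enumerate(lst):
--         new_row = list(row)
--         for c in range(cols):
--             v = row[c]
--             if v == '#':
--                 continue
--             cnt = 0
--             for nr in range(max(r - 1, 0), min(r + 2, rows)):
--                 for nc in range(max(c - 1, 0), min(c + 2, cols)):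
--                     if (nr, nc) != (r, c) and lst[nr][nc] == '#':
--                         cnt += 1
--             if cnt:
--                 new_row[c] = str(cnt)
--             elif v == '-':
--                 new_row[c] = '0'
--         out.append(new_row)
--     return out
-- ===== Notes on version B (the rewrite author's own statement) =====
-- stated objective: alternative
-- what changed: Instead of collecting all '#' positions and scanning that whole list for every cell (then patching the grid through a dict and two more fix-up passes), B computes each cell's count by examining only its at-most-8 clipped neighbor cells in a single pass that builds the output rows directly.
import Mathlib
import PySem

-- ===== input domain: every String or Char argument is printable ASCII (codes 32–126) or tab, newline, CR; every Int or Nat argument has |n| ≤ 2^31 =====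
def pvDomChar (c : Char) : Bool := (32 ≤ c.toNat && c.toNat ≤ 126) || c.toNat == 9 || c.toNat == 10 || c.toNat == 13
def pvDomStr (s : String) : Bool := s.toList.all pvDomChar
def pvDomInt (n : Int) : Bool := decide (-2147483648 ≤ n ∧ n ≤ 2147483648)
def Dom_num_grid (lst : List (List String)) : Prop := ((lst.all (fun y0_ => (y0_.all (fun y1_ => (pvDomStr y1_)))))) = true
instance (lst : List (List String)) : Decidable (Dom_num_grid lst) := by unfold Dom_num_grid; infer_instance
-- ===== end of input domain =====

-- B replaces A's scan of the full '#'-position list for every cell (plus a dict patch pass and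
-- two fix-up passes) by a single pass that counts only each cell's ≤8 clipped neighbors.
-- NOTE: Python A mutates the inner lists of `lst` in place (shallow copy); B is pure — the
-- equivalence proved here is about the RETURN value only.

-- ===== PORT A =====
-- grid[r][c] = v  (indices nonnegative and in range on every input admitted by Pre_)
def pyUpd (g : List (List String)) (r c : Int) (v : String) : List (List String) :=
  PySem.List.pySetD g r (PySem.List.pySetD (PySem.List.pyGetD g r []) c v)

-- lst[r][c] read (exact under Pre_, where every read index is in range)
def pyRd (g : List (List String)) (r c : Int) : String :=
  PySem.List.pyGetD (PySem.List.pyGetD g r []) c ""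

def num_grid (lst : List (List String)) : List (List String) :=
  -- len(lst[0]) : only ever evaluated by Python when lst ≠ [] (loops over range(len(lst)));
  -- headD [] agrees with lst[0] there and makes the empty loops empty just as in Python.
  let R : Int := lst.length
  let C : Int := (lst.headD []).length
  let check : List (Int × Int) :=
    (PySem.List.pyRange 0 R 1).foldl (fun acc r =>
      (PySem.List.pyRange 0 C 1).foldl (fun acc c =>
        if pyRd lst r c = "#" then acc ++ [(r, c)] else acc) acc) []
  let d : PySem.Dict (Int × Int) Int :=
    (PySem.List.pyRange 0 R 1).foldl (fun d m =>
      (PySem.List.pyRange 0 C 1).foldl (fun d n =>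
        check.foldl (fun d t =>
          if |m - t.1| ≤ 1 ∧ |n - t.2| ≤ 1 ∧ (m, n) ≠ t then
            d.modify (m, n) 0 (· + 1)
          else d) d) d) PySem.Dict.empty
  let grid := lst
  let grid := d.items.foldl (fun g kv => pyUpd g kv.1.1 kv.1.2 (PySem.Int.toStr kv.2)) grid
  let grid := (PySem.List.pyRange 0 R 1).foldl (fun g a =>
    let g := (PySem.List.pyRange 0 C 1).foldl (fun g b =>
      if pyRd g a b = "-" then pyUpd g a b "0" else g) g
    check.foldl (fun g t => pyUpd g t.1 t.2 "#") g) grid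
  grid

-- ===== PORT B =====
-- lst[nr][nc] read (B's own accessor; exact on in-range indices, which is all B ever uses)
def pyRdB (g : List (List String)) (r c : Int) : String :=
  PySem.List.pyGetD (PySem.List.pyGetD g r []) c ""

-- count of '#' among the clipped 3×3 neighborhood of (r,c), excluding (r,c) itself
def nbCount (lst : List (List String)) (rows cols : Int) (r c : Int) : Int :=
  (PySem.List.pyRange (max (r - 1) 0) (min (r + 2) rows) 1).foldl (fun cnt nr =>
    (PySem.List.pyRange (max (c - 1) 0) (min (c + 2) cols) 1).foldl (fun cnt nc =>
      if (nr, nc) ≠ (r, c) ∧ pyRdB lst nr nc = "#" then cnt + 1 else cnt) cnt) 0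

def num_grid_alt (lst : List (List String)) : List (List String) :=
  let rows : Int := lst.length
  let cols : Int := if lst ≠ [] then ((lst.headD []).length : Int) else 0
  (PySem.List.enumerate lst 0).foldl (fun out p =>
    let r := p.1
    let row := p.2
    let newRow := (PySem.List.pyRange 0 cols 1).foldl (fun nr c =>
      let v := PySem.List.pyGetD row c ""
      if v = "#" then nr
      else
        let cnt := nbCount lst rows cols r c
        if cnt ≠ 0 then PySem.List.pySetD nr c (PySem.Int.toStr cnt)
        else if v = "-" then PySem.List.pySetD nr c "0"
        else nr) row
    out ++ [newRow]) []

-- ===== PRECONDITION & SPEC =====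
-- Pre_ excludes ragged grids whose later rows are SHORTER than row 0: there Python A raises
-- IndexError (lst[r][c] for c < len(lst[0])).
def Pre_num_grid (lst : List (List String)) : Prop :=
  ∀ row ∈ lst, (lst.headD []).length ≤ row.length
instance (lst : List (List String)) : Decidable (Pre_num_grid lst) := by
  unfold Pre_num_grid; infer_instance

def pvWitness_num_grid : List (List String) := [["#", "-"], ["-", "-"]]

def Spec_num_grid (lst : List (List String)) (out : List (List String)) : Prop := out = num_grid_alt lst
instance (lst : List (List String)) (out : List (List String)) : Decidable (Spec_num_grid lst out) := by unfold Spec_num_grid; infer_instance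

-- ===== CLAIM (what is proved, stated in full; the proofs are below) =====
def Claim_equal_num_grid : Prop := ∀ (lst : List (List String)), Dom_num_grid lst → Pre_num_grid lst → Spec_num_grid lst (num_grid lst)

-- ===== LEMMAS AND PROOFS =====

-- read/write primitives over Nat indices
def cellD (g : List (List String)) (a b : Nat) : String := (g.getD a []).getD b ""
def updN (g : List (List String)) (a b : Nat) (v : String) : List (List String) :=
  g.set a ((g.getD a []).set b v)


-- closed forms of A's intermediate data
def adjB (a b : Int) (t : Int × Int) : Bool := decide (|a - t.1| ≤ 1 ∧ |b - t.2| ≤ 1 ∧ (a, b) ≠ t)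
def checkL (lst : List (List String)) : List (Int × Int) :=
  (PySem.List.pyRange 0 (lst.length : Int) 1).flatMap (fun r =>
    ((PySem.List.pyRange 0 (((lst.headD []).length : Nat) : Int) 1).filter
      (fun c => decide (pyRd lst r c = "#"))).map (fun c => (r, c)))
def keyL (lst : List (List String)) : List (Int × Int) :=
  (PySem.List.pyRange 0 (lst.length : Int) 1).flatMap (fun m =>
    (PySem.List.pyRange 0 (((lst.headD []).length : Nat) : Int) 1).flatMap (fun n =>
      ((checkL lst).filter (adjB m n)).map (fun _ => (m, n))))
def cntA (lst : List (List String)) (a b : Nat) : Nat := (checkL lst).countP (adjB a b)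

-- the per-cell value both programs produce
def f1 (lst : List (List String)) (a b : Nat) : String :=
  if b < (lst.headD []).length ∧ cntA lst a b ≠ 0 then PySem.Int.toStr (cntA lst a b) else cellD lst a b
def Fm (lst : List (List String)) (m a b : Nat) : String :=
  if b < (lst.headD []).length ∧ 0 < m ∧ cellD lst a b = "#" then "#"
  else if b < (lst.headD []).length ∧ a < m ∧ cellD lst a b ≠ "#" then
    (if f1 lst a b = "-" then "0" else f1 lst a b)
  else f1 lst a b

-- ---------- primitive write lemmas ----------
theorem length_pyUpd (g : List (List String)) (r c : Int) (v : String) :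
    (pyUpd g r c v).length = g.length := by
  simp only [pyUpd, PySem.List.pySetD, PySem.List.pySet?]
  cases PySem.List.pyIdx? g.length r <;> simp

theorem rowlen_pyUpd (g : List (List String)) (r c : Int) (v : String) (k : Nat) :
    ((pyUpd g r c v).getD k []).length = ((g.getD k []).length) := by
  simp only [pyUpd, PySem.List.pySetD, PySem.List.pySet?, PySem.List.pyGetD,
    PySem.List.pyGet?, PySem.List.pyIdx?]
  split_ifs <;> simp [List.getD_eq_getElem?_getD, List.getElem?_set] <;> split_ifs <;> simp_all

theorem pyUpd_natCast (g : List (List String)) (a b : Nat) (v : String) :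
    pyUpd g (a : Int) (b : Int) v = updN g a b v := by
  simp [pyUpd, updN, PySem.List.pySetD_natCast, PySem.List.pyGetD_natCast]

theorem cellD_updN (g : List (List String)) (a b a' b' : Nat) (v : String) :
    cellD (updN g a b v) a' b' =
      if a' = a ∧ b' = b ∧ a < g.length ∧ b < (g.getD a []).length then v else cellD g a' b' := by
  unfold cellD updN
  by_cases hA : a' = a
  · subst hA
    by_cases hL : a' < g.length
    · have hga : g.getD a' [] = g[a'] := by simp [List.getD_eq_getElem?_getD, hL]
      by_cases hB : b' = b
      · subst hB
        by_cases hb : b' < (g.getD a' []).length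
        · simp [List.getD_eq_getElem?_getD, List.getElem?_set, hL, hga ▸ hb, hb]
        · have hb2 : ¬ b' < g[a'].length := by rw [← hga]; exact hb
          simp [List.getD_eq_getElem?_getD, List.getElem?_set, hL, hb, hb2]
      · have hB2 : ¬ b = b' := fun h => hB h.symm
        simp [List.getD_eq_getElem?_getD, List.getElem?_set, hL, hB2]
        exact fun h => absurd h hB
    · simp [List.getD_eq_getElem?_getD, List.getElem?_set, hL]
  · have hA2 : ¬ a = a' := fun h => hA h.symm
    simp [List.getD_eq_getElem?_getD, List.getElem?_set, hA2]
    exact fun h => absurd h hA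

theorem cellD_pyUpd_other (g : List (List String)) (r c : Int) (a b : Nat) (v : String)
    (hr : 0 ≤ r) (hc : 0 ≤ c) (h : (r, c) ≠ ((a : Int), (b : Int))) :
    cellD (pyUpd g r c v) a b = cellD g a b := by
  have hr' : r = ((r.toNat : Nat) : Int) := (Int.toNat_of_nonneg hr).symm
  have hc' : c = ((c.toNat : Nat) : Int) := (Int.toNat_of_nonneg hc).symm
  rw [hr', hc', pyUpd_natCast, cellD_updN]
  rw [if_neg]
  rintro ⟨rfl, rfl, -⟩
  exact h (by rw [Int.toNat_of_nonneg hr, Int.toNat_of_nonneg hc])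

-- ---------- pair-fold (dict-items pass and '#'-restore pass) ----------
def pfold (ps : List ((Int × Int) × String)) (g : List (List String)) : List (List String) :=
  ps.foldl (fun g kv => pyUpd g kv.1.1 kv.1.2 kv.2) g

theorem length_pfold (ps : List ((Int × Int) × String)) (g : List (List String)) :
    (pfold ps g).length = g.length := by
  induction ps generalizing g with
  | nil => rfl
  | cons kv rest ih => rw [pfold, List.foldl_cons, ← pfold, ih, length_pyUpd]

theorem rowlen_pfold (ps : List ((Int × Int) × String)) (g : List (List String)) (k : Nat) :
    ((pfold ps g).getD k []).length = ((g.getD k []).length) := by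
  induction ps generalizing g with
  | nil => rfl
  | cons kv rest ih => rw [pfold, List.foldl_cons, ← pfold, ih, rowlen_pyUpd]

theorem cellD_pfold_notmem : ∀ (ps : List ((Int × Int) × String)) (g : List (List String)) (a b : Nat),
    (∀ kv ∈ ps, 0 ≤ kv.1.1 ∧ 0 ≤ kv.1.2) → ((a : Int), (b : Int)) ∉ ps.map Prod.fst →
    cellD (pfold ps g) a b = cellD g a b := by
  intro ps
  induction ps with
  | nil => intro g a b _ _; rfl
  | cons kv rest ih =>
    intro g a b hpos h
    have hkey : kv.1 ≠ ((a : Int), (b : Int)) := fun hEq => h (by simp [hEq.symm])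
    have hpos0 := hpos kv (List.mem_cons_self)
    rw [pfold, List.foldl_cons, ← pfold,
      ih _ a b (fun x hx => hpos x (List.mem_cons_of_mem _ hx)) (fun hx => h (by simp at hx ⊢; exact Or.inr hx)),
      cellD_pyUpd_other _ _ _ _ _ _ hpos0.1 hpos0.2 hkey]

theorem cellD_pfold_mem : ∀ (ps : List ((Int × Int) × String)) (g : List (List String)) (a b : Nat)
    (v : String), (∀ kv ∈ ps, 0 ≤ kv.1.1 ∧ 0 ≤ kv.1.2) → (ps.map Prod.fst).Nodup →
    (((a : Int), (b : Int)), v) ∈ ps → a < g.length → b < (g.getD a []).length →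
    cellD (pfold ps g) a b = v := by
  intro ps
  induction ps with
  | nil => intro g a b v _ _ hmem; simp at hmem
  | cons kv rest ih =>
    intro g a b v hpos hnd hmem ha hb
    rw [List.map_cons, List.nodup_cons] at hnd
    rw [pfold, List.foldl_cons, ← pfold]
    rcases List.mem_cons.mp hmem with hmem | hmem
    · have hk1 : kv.1 = ((a : Int), (b : Int)) := by rw [← hmem]
      have hk2 : kv.2 = v := by rw [← hmem]
      have hup : pyUpd g kv.1.1 kv.1.2 kv.2 = updN g a b v := by
        rw [hk2, ← pyUpd_natCast]; congr 1 <;> rw [hk1]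
      rw [hup, cellD_pfold_notmem rest _ a b (fun x hx => hpos x (List.mem_cons_of_mem _ hx))
        (hk1 ▸ hnd.1), cellD_updN, if_pos ⟨rfl, rfl, ha, hb⟩]
    · exact ih _ a b v (fun x hx => hpos x (List.mem_cons_of_mem _ hx)) hnd.2 hmem
        (by rw [length_pyUpd]; exact ha)
        (by rw [rowlen_pyUpd]; exact hb)

-- ---------- the '-' → '0' row pass ----------
def rowpass (g : List (List String)) (m C : Nat) : List (List String) :=
  (List.range C).foldl (fun g b => if cellD g m b = "-" then updN g m b "0" else g) g

theorem length_rowpass (g : List (List String)) (m C : Nat) :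
    (rowpass g m C).length = g.length := by
  induction C with
  | zero => rfl
  | succ n ih =>
    rw [rowpass, List.range_succ, List.foldl_append, ← rowpass, List.foldl_cons, List.foldl_nil]
    split <;> simp [updN, ih]

theorem rowlen_rowpass (g : List (List String)) (m C k : Nat) :
    ((rowpass g m C).getD k []).length = ((g.getD k []).length) := by
  induction C with
  | zero => rfl
  | succ n ih =>
    rw [rowpass, List.range_succ, List.foldl_append, ← rowpass, List.foldl_cons, List.foldl_nil]
    split
    · have h2 := rowlen_pyUpd (rowpass g m n) ((m : Nat) : Int) ((n : Nat) : Int) "0" k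
      rw [pyUpd_natCast] at h2
      rw [h2]; exact ih
    · exact ih

theorem cellD_rowpass (g : List (List String)) (m C a b : Nat) :
    cellD (rowpass g m C) a b =
      if a = m ∧ b < C ∧ a < g.length ∧ b < (g.getD a []).length ∧ cellD g a b = "-" then "0"
      else cellD g a b := by
  induction C generalizing a b with
  | zero =>
    rw [rowpass, List.range_zero, List.foldl_nil, if_neg]
    rintro ⟨-, h0, -⟩; omega
  | succ n ih =>
    rw [rowpass, List.range_succ, List.foldl_append, ← rowpass, List.foldl_cons, List.foldl_nil]
    have hlen := length_rowpass g m n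
    have hrow := fun k => rowlen_rowpass g m n k
    have hmn : cellD (rowpass g m n) m n = cellD g m n := by
      rw [ih m n, if_neg]; rintro ⟨-, h0, -⟩; omega
    split
    · rename_i hcond
      rw [cellD_updN, hrow, hlen]
      by_cases hin : a = m ∧ b = n ∧ m < g.length ∧ n < (g.getD m []).length
      · rcases hin with ⟨rfl, rfl, hin1, hin2⟩
        rw [if_pos ⟨rfl, rfl, hin1, hin2⟩,
          if_pos ⟨rfl, by omega, hin1, hin2, by rwa [hmn] at hcond⟩]
      · rw [if_neg hin, ih a b]
        by_cases hc : a = m ∧ b < n ∧ a < g.length ∧ b < (g.getD a []).length ∧ cellD g a b = "-"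
        · rw [if_pos hc, if_pos ⟨hc.1, by omega, hc.2.2⟩]
        · rw [if_neg hc, if_neg ?_]
          rintro ⟨h1, h2, h3, h4, h5⟩
          rcases (by omega : b < n ∨ b = n) with h6 | h6
          · exact hc ⟨h1, h6, h3, h4, h5⟩
          · exact hin ⟨h1, h6, by omega, by rw [← h1, ← h6]; exact h4⟩
    · rename_i hcond
      rw [ih a b]
      by_cases hc : a = m ∧ b < n ∧ a < g.length ∧ b < (g.getD a []).length ∧ cellD g a b = "-"
      · rw [if_pos hc, if_pos ⟨hc.1, by omega, hc.2.2⟩]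
      · rw [if_neg hc, if_neg ?_]
        rintro ⟨h1, h2, h3, h4, h5⟩
        rcases (by omega : b < n ∨ b = n) with h6 | h6
        · exact hc ⟨h1, h6, h3, h4, h5⟩
        · subst h1; subst h6
          exact hcond (by rwa [hmn])

-- ---------- membership / nodup facts and count equivalence ----------
theorem mem_checkL (lst : List (List String)) (t : Int × Int) :
    t ∈ checkL lst ↔
      0 ≤ t.1 ∧ t.1 < (lst.length : Int) ∧ 0 ≤ t.2 ∧ t.2 < (((lst.headD []).length : Nat) : Int) ∧
        pyRd lst t.1 t.2 = "#" := by
  unfold checkL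
  simp only [List.mem_flatMap, List.mem_map, List.mem_filter, PySem.List.mem_pyRange_one,
    decide_eq_true_eq]
  constructor
  · rintro ⟨r, hr, c, ⟨⟨hc1, hc2⟩, hrd⟩, rfl⟩
    exact ⟨hr.1, hr.2, hc1, hc2, hrd⟩
  · rintro ⟨h1, h2, h3, h4, h5⟩
    exact ⟨t.1, ⟨h1, h2⟩, t.2, ⟨⟨⟨h3, h4⟩, h5⟩, rfl⟩⟩

theorem nodup_checkL (lst : List (List String)) : (checkL lst).Nodup := by
  unfold checkL
  rw [List.nodup_flatMap]
  refine ⟨fun r _ => ?_, ?_⟩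
  · exact ((PySem.List.nodup_pyRange_one _ _).filter _).map (fun c c' h => by simpa using h)
  · refine List.Pairwise.imp ?_ (PySem.List.pairwise_lt_pyRange_one 0 (lst.length : Int))
    intro r r' hlt p hp hp'
    simp only [List.mem_map, List.mem_filter] at hp hp'
    rcases hp with ⟨c, -, rfl⟩
    rcases hp' with ⟨c', -, hEq⟩
    exact absurd (congrArg Prod.fst hEq) (by simp; omega)

theorem mem_keyL (lst : List (List String)) (t : Int × Int) :
    t ∈ keyL lst ↔
      0 ≤ t.1 ∧ t.1 < (lst.length : Int) ∧ 0 ≤ t.2 ∧ t.2 < (((lst.headD []).length : Nat) : Int) ∧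
        (checkL lst).countP (adjB t.1 t.2) ≠ 0 := by
  unfold keyL
  simp only [List.mem_flatMap, List.mem_map, List.mem_filter, PySem.List.mem_pyRange_one]
  constructor
  · rintro ⟨m, hm, n, hn, x, hx, rfl⟩
    refine ⟨hm.1, hm.2, hn.1, hn.2, ?_⟩
    intro h0
    exact (List.countP_eq_zero.mp h0 x hx.1) hx.2
  · rintro ⟨h1, h2, h3, h4, h5⟩
    have hex : ¬ ∀ a ∈ checkL lst, ¬ adjB t.1 t.2 a = true :=
      fun hall => h5 (List.countP_eq_zero.mpr hall)
    push_neg at hex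
    rcases hex with ⟨x, hx1, hx2⟩
    exact ⟨t.1, ⟨h1, h2⟩, t.2, ⟨h3, h4⟩, x, ⟨hx1, hx2⟩, rfl⟩

theorem sum_map_ite_eq (l : List Int) (hl : l.Nodup) (x0 : Int) (f : Int → Nat) :
    (l.map (fun x => if x = x0 then f x else 0)).sum = if x0 ∈ l then f x0 else 0 := by
  induction l with
  | nil => simp
  | cons x rest ih =>
    rw [List.nodup_cons] at hl
    rw [List.map_cons, List.sum_cons, ih hl.2]
    by_cases hx : x = x0
    · subst hx
      simp [hl.1]
    · have hx2 : ¬ x0 = x := fun h => hx h.symm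
      simp [hx, hx2]

theorem foldl_flatMap {α β γ : Type} (l : List α) (f : α → List β) (g : γ → β → γ) (init : γ) :
    (l.flatMap f).foldl g init = l.foldl (fun acc x => (f x).foldl g acc) init := by
  induction l generalizing init with
  | nil => rfl
  | cons x rest ih => rw [List.flatMap_cons, List.foldl_append, List.foldl_cons, ih]

theorem count_keyL (lst : List (List String)) (a b : Nat)
    (ha : ((a : Nat) : Int) < (lst.length : Int)) (hb : ((b : Nat) : Int) < (((lst.headD []).length : Nat) : Int)) :
    (keyL lst).count ((a : Int), (b : Int)) = cntA lst a b := by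
  unfold keyL cntA
  rw [List.count_eq_countP, List.countP_flatMap]
  have inner2 : ∀ m n : Int,
      List.countP (fun x => x == ((a : Int), (b : Int)))
        (((checkL lst).filter (adjB m n)).map (fun _ => (m, n)))
      = if m = (a : Int) ∧ n = (b : Int) then ((checkL lst).filter (adjB m n)).length else 0 := by
    intro m n
    rw [List.countP_map]
    by_cases h : m = (a : Int) ∧ n = (b : Int)
    · rcases h with ⟨rfl, rfl⟩
      simp [Function.comp]
    · rw [if_neg h, List.countP_eq_zero.mpr]
      intro x _
      simp only [Function.comp, beq_iff_eq, Prod.ext_iff]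
      rintro ⟨h1, h2⟩
      exact h ⟨h1, h2⟩
  have inner1 : ∀ m : Int,
      List.countP (fun x => x == ((a : Int), (b : Int)))
        ((PySem.List.pyRange 0 (((lst.headD []).length : Nat) : Int) 1).flatMap (fun n =>
          ((checkL lst).filter (adjB m n)).map (fun _ => (m, n))))
      = if m = (a : Int) then List.countP (adjB (a : Int) (b : Int)) (checkL lst) else 0 := by
    intro m
    rw [List.countP_flatMap]
    by_cases hm : m = (a : Int)
    · subst hm
      rw [if_pos rfl]
      have : ∀ x : Int, (List.countP (fun x => x == ((a : Int), (b : Int))) ∘ fun n =>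
          ((checkL lst).filter (adjB (a : Int) n)).map fun _ => ((a : Int), n)) x
          = (fun n => if n = (b : Int) then ((checkL lst).filter (adjB (a : Int) n)).length else 0) x := by
        intro n
        simp only [Function.comp]
        rw [inner2]
        by_cases hn : n = (b : Int) <;> simp [hn]
      rw [List.map_congr_left (fun x _ => this x),
        sum_map_ite_eq _ (PySem.List.nodup_pyRange_one _ _) _ _,
        if_pos (PySem.List.mem_pyRange_one.mpr ⟨by omega, hb⟩), List.countP_eq_length_filter]
    · rw [if_neg hm, List.sum_eq_zero]
      intro x hx
      rw [List.mem_map] at hx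
      rcases hx with ⟨n, -, rfl⟩
      simp only [Function.comp]
      rw [inner2, if_neg (fun hc => hm hc.1)]
  rw [List.map_congr_left (fun x _ => by rw [Function.comp, inner1 x]),
    sum_map_ite_eq _ (PySem.List.nodup_pyRange_one _ _) _ _,
    if_pos (PySem.List.mem_pyRange_one.mpr ⟨by omega, ha⟩)]

theorem sum_map_filter_eq (l : List Int) (p : Int → Bool) (g : Int → Nat) :
    ((l.filter p).map g).sum = (l.map (fun x => if p x then g x else 0)).sum := by
  induction l with
  | nil => rfl
  | cons x rest ih => by_cases h : p x <;> simp [h, ih]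

theorem clip_pyRange (N : Int) (a : Int) :
    PySem.List.pyRange (max (a - 1) 0) (min (a + 2) N) 1 =
      (PySem.List.pyRange 0 N 1).filter (fun x => decide (|a - x| ≤ 1)) := by
  have h2 : List.Pairwise (· < ·) ((PySem.List.pyRange 0 N 1).filter (fun x => decide (|a - x| ≤ 1))) :=
    (PySem.List.pairwise_lt_pyRange_one 0 N).filter _
  have hperm : (PySem.List.pyRange (max (a - 1) 0) (min (a + 2) N) 1).Perm
      ((PySem.List.pyRange 0 N 1).filter (fun x => decide (|a - x| ≤ 1))) := by
    apply List.perm_of_nodup_nodup_toFinset_eq (PySem.List.nodup_pyRange_one _ _)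
      ((PySem.List.nodup_pyRange_one _ _).filter _)
    ext x
    simp only [List.mem_toFinset, List.mem_filter, PySem.List.mem_pyRange_one,
      decide_eq_true_eq, abs_le]
    omega
  exact List.eq_of_perm_of_sorted (fun x y _ _ h1 h2 => by omega)
    (PySem.List.pairwise_lt_pyRange_one _ _) h2 hperm

theorem sum_map_cast {α : Type} (l : List α) (f : α → Nat) :
    (l.map (fun x => ((f x : Nat) : Int))).sum = (((l.map f).sum : Nat) : Int) := by
  induction l with
  | nil => rfl
  | cons x rest ih => simp [ih]

theorem cntA_eq_clip (lst : List (List String)) (a b : Nat)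
    (ha : a < lst.length) (hb : b < (lst.headD []).length) :
    cntA lst a b =
      ((PySem.List.pyRange (max ((a : Int) - 1) 0) (min ((a : Int) + 2) (lst.length : Int)) 1).map
        (fun nr => (PySem.List.pyRange (max ((b : Int) - 1) 0)
            (min ((b : Int) + 2) (((lst.headD []).length : Nat) : Int)) 1).countP
          (fun nc => decide ((nr, nc) ≠ ((a : Int), (b : Int)) ∧ pyRd lst nr nc = "#")))).sum := by
  unfold cntA checkL
  rw [List.countP_flatMap, clip_pyRange (lst.length : Int) (a : Int), sum_map_filter_eq]
  apply congrArg List.sum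
  apply List.map_congr_left
  intro r _
  show (List.countP (adjB ((a : Nat) : Int) ((b : Nat) : Int))
      (List.map (fun c => (r, c))
        (List.filter (fun c => decide (pyRd lst r c = "#"))
          (PySem.List.pyRange 0 ((lst.headD []).length : Int) 1)))) = _
  rw [List.countP_map, List.countP_filter,
    clip_pyRange (((lst.headD []).length : Nat) : Int) (b : Int), List.countP_filter]
  by_cases hnear : |(a : Int) - r| ≤ 1
  · have hnear' := abs_le.mp hnear
    rw [if_pos (by simp [hnear])]
    apply List.countP_congr
    intro c _
    simp only [Function.comp_apply, adjB]
    by_cases h3 : pyRd lst r c = "#" <;> simp [h3, Prod.ext_iff, abs_le] <;> omega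
  · rw [if_neg (by simp [hnear]), List.countP_eq_zero.mpr]
    intro c _
    simp [adjB, hnear]

theorem nbCount_eq_cntA (lst : List (List String)) (a b : Nat)
    (ha : a < lst.length) (hb : b < (lst.headD []).length) :
    nbCount lst (lst.length : Int) (((lst.headD []).length : Nat) : Int) (a : Int) (b : Int) =
      (cntA lst a b : Int) := by
  unfold nbCount
  have hstep : (fun (cnt : Int) (nr : Int) =>
      (PySem.List.pyRange (max ((b : Int) - 1) 0)
        (min ((b : Int) + 2) (((lst.headD []).length : Nat) : Int)) 1).foldl
        (fun cnt nc => if (nr, nc) ≠ ((a : Int), (b : Int)) ∧ pyRdB lst nr nc = "#" then cnt + 1 else cnt) cnt)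
      = (fun (cnt : Int) (nr : Int) => cnt +
        ((PySem.List.pyRange (max ((b : Int) - 1) 0)
            (min ((b : Int) + 2) (((lst.headD []).length : Nat) : Int)) 1).countP
          (fun nc => decide ((nr, nc) ≠ ((a : Int), (b : Int)) ∧ pyRdB lst nr nc = "#")) : Nat)) := by
    funext cnt nr
    exact PySem.List.foldl_ite_add_one _ _ _
  rw [hstep, PySem.List.foldl_add, zero_add, sum_map_cast, cntA_eq_clip lst a b ha hb]
  rfl

theorem cntA_le_nine (lst : List (List String)) (a b : Nat)
    (ha : a < lst.length) (hb : b < (lst.headD []).length) : cntA lst a b ≤ 9 := by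
  rw [cntA_eq_clip lst a b ha hb]
  have hlen : ∀ (N x : Int), (PySem.List.pyRange (max (x - 1) 0) (min (x + 2) N) 1).length ≤ 3 := by
    intro N x
    rw [PySem.List.length_pyRange_one]
    omega
  calc ((PySem.List.pyRange (max ((a : Int) - 1) 0) (min ((a : Int) + 2) (lst.length : Int)) 1).map
        (fun nr => (PySem.List.pyRange (max ((b : Int) - 1) 0)
            (min ((b : Int) + 2) (((lst.headD []).length : Nat) : Int)) 1).countP
          (fun nc => decide ((nr, nc) ≠ ((a : Int), (b : Int)) ∧ pyRd lst nr nc = "#")))).sum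
      ≤ ((PySem.List.pyRange (max ((a : Int) - 1) 0) (min ((a : Int) + 2) (lst.length : Int)) 1).map
        (fun nr => (3 : Nat))).sum := by
        apply List.sum_le_sum
        intro i hi
        exact le_trans List.countP_le_length (hlen _ _)
    _ ≤ 9 := by
        rw [List.map_const', List.sum_replicate, smul_eq_mul]
        have := hlen (lst.length : Int) (a : Int)
        calc (PySem.List.pyRange (max ((a : Int) - 1) 0) (min ((a : Int) + 2) (lst.length : Int)) 1).length * 3
            ≤ 3 * 3 := by omega
          _ ≤ 9 := by omega

theorem toStr_ne_dash (n : Nat) (h1 : n ≠ 0) (h9 : n ≤ 9) :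
    PySem.Int.toStr (n : Int) ≠ "-" := by
  interval_cases n <;> decide

theorem check_eq (lst : List (List String)) :
    ((PySem.List.pyRange 0 (lst.length : Int) 1).foldl (fun acc r =>
      (PySem.List.pyRange 0 (((lst.headD []).length : Nat) : Int) 1).foldl (fun acc c =>
        if pyRd lst r c = "#" then acc ++ [(r, c)] else acc) acc) []) = checkL lst := by
  unfold checkL
  have hstep : (fun (acc : List (Int × Int)) (r : Int) =>
      (PySem.List.pyRange 0 (((lst.headD []).length : Nat) : Int) 1).foldl (fun acc c =>
        if pyRd lst r c = "#" then acc ++ [(r, c)] else acc) acc)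
      = (fun acc r => acc ++
        ((PySem.List.pyRange 0 (((lst.headD []).length : Nat) : Int) 1).filter
          (fun c => decide (pyRd lst r c = "#"))).map (fun c => (r, c))) := by
    funext acc r
    exact PySem.List.foldl_append_ite _ _ _ _
  rw [hstep, PySem.List.foldl_append_eq_flatMap, List.nil_append]

theorem d_eq (lst : List (List String)) :
    ((PySem.List.pyRange 0 (lst.length : Int) 1).foldl (fun d m =>
      (PySem.List.pyRange 0 (((lst.headD []).length : Nat) : Int) 1).foldl (fun d n =>
        (checkL lst).foldl (fun d t =>
          if |m - t.1| ≤ 1 ∧ |n - t.2| ≤ 1 ∧ (m, n) ≠ t then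
            d.modify (m, n) 0 (· + 1)
          else d) d) d) PySem.Dict.empty) = PySem.Dict.counter (keyL lst) := by
  rw [PySem.Dict.counter_eq_foldl]
  unfold keyL
  rw [foldl_flatMap]
  have hstep2 : ∀ (m n : Int) (d : PySem.Dict (Int × Int) Int),
      (checkL lst).foldl (fun d t =>
          if |m - t.1| ≤ 1 ∧ |n - t.2| ≤ 1 ∧ (m, n) ≠ t then d.modify (m, n) 0 (· + 1) else d) d
      = (((checkL lst).filter (adjB m n)).map (fun _ => (m, n))).foldl
          (fun d x => d.modify x 0 (· + 1)) d := by
    intro m n d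
    rw [List.foldl_map, List.foldl_filter]
    have : (fun (d : PySem.Dict (Int × Int) Int) (t : Int × Int) =>
        if adjB m n t = true then d.modify (m, n) 0 (· + 1) else d)
        = (fun d t => if |m - t.1| ≤ 1 ∧ |n - t.2| ≤ 1 ∧ (m, n) ≠ t then d.modify (m, n) 0 (· + 1) else d) := by
      funext d t
      simp only [adjB, decide_eq_true_eq]
    rw [this]
  have hstep : (fun (d : PySem.Dict (Int × Int) Int) (m : Int) =>
      (PySem.List.pyRange 0 (((lst.headD []).length : Nat) : Int) 1).foldl (fun d n =>
        (checkL lst).foldl (fun d t =>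
          if |m - t.1| ≤ 1 ∧ |n - t.2| ≤ 1 ∧ (m, n) ≠ t then d.modify (m, n) 0 (· + 1) else d) d) d)
      = (fun d m =>
        ((PySem.List.pyRange 0 (((lst.headD []).length : Nat) : Int) 1).flatMap (fun n =>
          ((checkL lst).filter (adjB m n)).map (fun _ => (m, n)))).foldl
            (fun d x => d.modify x 0 (· + 1)) d) := by
    funext d m
    rw [foldl_flatMap]
    have h2 : (fun (d : PySem.Dict (Int × Int) Int) (n : Int) =>
        (checkL lst).foldl (fun d t =>
          if |m - t.1| ≤ 1 ∧ |n - t.2| ≤ 1 ∧ (m, n) ≠ t then d.modify (m, n) 0 (· + 1) else d) d)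
        = (fun d n => (((checkL lst).filter (adjB m n)).map (fun _ => (m, n))).foldl
            (fun d x => d.modify x 0 (· + 1)) d) := by
      funext d n
      exact hstep2 m n d
    rw [h2]
  rw [hstep]

theorem pyRd_natCast (g : List (List String)) (a b : Nat) :
    pyRd g (a : Int) (b : Int) = cellD g a b := by
  simp [pyRd, cellD, PySem.List.pyGetD_natCast]

theorem itemsP_eq (lst : List (List String)) :
    (PySem.Dict.counter (keyL lst)).items.map (fun kv => (kv.1, PySem.Int.toStr kv.2)) =
      (PySem.Set.ofList (keyL lst)).map (fun k => (k, PySem.Int.toStr ((keyL lst).count k))) := by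
  rw [PySem.Dict.items_counter, List.map_map]
  rfl

theorem itemsP_keys (lst : List (List String)) :
    (((PySem.Dict.counter (keyL lst)).items.map (fun kv => (kv.1, PySem.Int.toStr kv.2))).map
      Prod.fst) = PySem.Set.ofList (keyL lst) := by
  rw [itemsP_eq, List.map_map]
  exact List.map_id _

theorem itemsP_pos (lst : List (List String)) :
    ∀ kv ∈ (PySem.Dict.counter (keyL lst)).items.map (fun kv => (kv.1, PySem.Int.toStr kv.2)),
      0 ≤ kv.1.1 ∧ 0 ≤ kv.1.2 := by
  intro kv hkv
  rw [itemsP_eq, List.mem_map] at hkv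
  rcases hkv with ⟨k, hk, rfl⟩
  have := (mem_keyL lst k).mp ((PySem.Set.mem_ofList _ _).mp hk)
  exact ⟨this.1, this.2.2.1⟩

-- ---------- stage 1: the grid after the dict-items pass ----------
def stage1 (lst : List (List String)) : List (List String) :=
  pfold ((PySem.Dict.counter (keyL lst)).items.map (fun kv => (kv.1, PySem.Int.toStr kv.2))) lst

theorem length_stage1 (lst : List (List String)) : (stage1 lst).length = lst.length := by
  rw [stage1, length_pfold]

theorem rowlen_stage1 (lst : List (List String)) (k : Nat) :
    ((stage1 lst).getD k []).length = ((lst.getD k []).length) := by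
  rw [stage1, rowlen_pfold]

theorem cellD_stage1 (lst : List (List String)) (a b : Nat) (hPre : Pre_num_grid lst)
    (ha : a < lst.length) (hb : b < (lst.getD a []).length) :
    cellD (stage1 lst) a b = f1 lst a b := by
  have hCrow : (lst.headD []).length ≤ (lst.getD a []).length := by
    apply hPre
    rw [List.getD_eq_getElem?_getD, List.getElem?_eq_getElem ha]
    exact List.getElem_mem ha
  unfold stage1 f1
  by_cases hcase : b < (lst.headD []).length ∧ cntA lst a b ≠ 0
  · rw [if_pos hcase]
    apply cellD_pfold_mem _ _ _ _ _ (itemsP_pos lst)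
      (by rw [itemsP_keys]; exact PySem.Set.nodup_ofList _) _ ha hb
    rw [itemsP_eq, List.mem_map]
    refine ⟨((a : Int), (b : Int)), (PySem.Set.mem_ofList _ _).mpr ((mem_keyL lst _).mpr
      ⟨by simp, by simpa using ha, by simp, by simpa using hcase.1, hcase.2⟩), ?_⟩
    rw [count_keyL lst a b (by exact_mod_cast ha) (by exact_mod_cast hcase.1)]
  · rw [if_neg hcase]
    apply cellD_pfold_notmem _ _ _ _ (itemsP_pos lst)
    rw [itemsP_keys]
    intro hmem
    have h2 := (mem_keyL lst _).mp ((PySem.Set.mem_ofList _ _).mp hmem)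
    have hbC : b < (lst.headD []).length := by
      have := h2.2.2.2.1
      simpa using this
    exact hcase ⟨hbC, by
      have := h2.2.2.2.2
      unfold cntA
      simpa using this⟩

-- ---------- stage 2: the interleaved '-'-fix / '#'-restore passes ----------
def apass (lst g : List (List String)) (m : Nat) : List (List String) :=
  pfold ((checkL lst).map (fun t => (t, "#"))) (rowpass g m (lst.headD []).length)

def stage2 (lst : List (List String)) (m : Nat) : List (List String) :=
  (List.range m).foldl (fun g a => apass lst g a) (stage1 lst)

theorem length_stage2 (lst : List (List String)) (m : Nat) :
    (stage2 lst m).length = lst.length := by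
  unfold stage2
  induction m with
  | zero => exact length_stage1 lst
  | succ n ih =>
    rw [List.range_succ, List.foldl_append, List.foldl_cons, List.foldl_nil, apass,
      length_pfold, length_rowpass]
    exact ih

theorem rowlen_stage2 (lst : List (List String)) (m k : Nat) :
    ((stage2 lst m).getD k []).length = ((lst.getD k []).length) := by
  unfold stage2
  induction m with
  | zero => exact rowlen_stage1 lst k
  | succ n ih =>
    rw [List.range_succ, List.foldl_append, List.foldl_cons, List.foldl_nil, apass,
      rowlen_pfold, rowlen_rowpass]
    exact ih

theorem cellD_stage2 (lst : List (List String)) (m a b : Nat) (hPre : Pre_num_grid lst)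
    (ha : a < lst.length) (hb : b < (lst.getD a []).length) :
    cellD (stage2 lst m) a b = Fm lst m a b := by
  suffices h : ∀ a b : Nat, a < lst.length → b < (lst.getD a []).length →
      cellD (stage2 lst m) a b = Fm lst m a b from h a b ha hb
  clear ha hb
  induction m with
  | zero =>
    intro a b ha hb
    unfold stage2
    rw [List.range_zero, List.foldl_nil, cellD_stage1 lst a b hPre ha hb]
    unfold Fm
    rw [if_neg (by rintro ⟨-, h0, -⟩; omega), if_neg (by rintro ⟨-, h0, -⟩; omega)]
  | succ n ih =>
    intro a b ha hb
    have hstep : stage2 lst (n + 1) =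
        pfold ((checkL lst).map (fun t => (t, "#"))) (rowpass (stage2 lst n) n (lst.headD []).length) := by
      unfold stage2 apass
      rw [List.range_succ, List.foldl_append, List.foldl_cons, List.foldl_nil]
    have hlen2 : (stage2 lst n).length = lst.length := length_stage2 lst n
    have hrow2 : ∀ k, ((stage2 lst n).getD k []).length = (lst.getD k []).length := rowlen_stage2 lst n
    have hkeys : ((checkL lst).map (fun t => (t, "#"))).map Prod.fst = checkL lst := by
      rw [List.map_map]; exact List.map_id _
    have hpos : ∀ kv ∈ (checkL lst).map (fun t => (t, "#")), 0 ≤ kv.1.1 ∧ 0 ≤ kv.1.2 := by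
      intro kv hkv
      rw [List.mem_map] at hkv
      rcases hkv with ⟨t, ht, rfl⟩
      have h2 := (mem_checkL lst t).mp ht
      exact ⟨h2.1, h2.2.2.1⟩
    rw [hstep]
    by_cases hH : b < (lst.headD []).length ∧ cellD lst a b = "#"
    · have hmem : ((((a : Int), (b : Int)), "#")) ∈ (checkL lst).map (fun t => (t, "#")) := by
        rw [List.mem_map]
        exact ⟨((a : Int), (b : Int)), (mem_checkL lst _).mpr
          ⟨by simp, by simpa using ha, by simp, by simpa using hH.1,
            by rw [pyRd_natCast]; exact hH.2⟩, rfl⟩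
      rw [cellD_pfold_mem _ _ a b "#" hpos (by rw [hkeys]; exact nodup_checkL lst) hmem
        (by rw [length_rowpass, hlen2]; exact ha) (by rw [rowlen_rowpass, hrow2]; exact hb)]
      unfold Fm
      rw [if_pos ⟨hH.1, Nat.succ_pos n, hH.2⟩]
    · have hnot : ((a : Int), (b : Int)) ∉ ((checkL lst).map (fun t => (t, "#"))).map Prod.fst := by
        rw [hkeys]
        intro hmem
        have h2 := (mem_checkL lst _).mp hmem
        exact hH ⟨by simpa using h2.2.2.2.1, by rw [← pyRd_natCast]; exact h2.2.2.2.2⟩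
      rw [cellD_pfold_notmem _ _ a b hpos hnot, cellD_rowpass, ih a b ha hb]
      simp only [hlen2, hrow2]
      have hFm : ∀ m' : Nat, Fm lst m' a b =
          if b < (lst.headD []).length ∧ a < m' then
            (if f1 lst a b = "-" then "0" else f1 lst a b)
          else f1 lst a b := by
        intro m'
        unfold Fm
        rw [if_neg (fun hcc => hH ⟨hcc.1, hcc.2.2⟩)]
        by_cases h2 : b < (lst.headD []).length ∧ a < m'
        · rw [if_pos ⟨h2.1, h2.2, fun hcc => hH ⟨h2.1, hcc⟩⟩, if_pos h2]
        · rw [if_neg (fun hx => h2 ⟨hx.1, hx.2.1⟩), if_neg h2]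
      rw [hFm n, hFm (n + 1)]
      by_cases hbC : b < (lst.headD []).length
      · by_cases han : a = n
        · subst han
          have e1 : (b < (lst.headD []).length ∧ a < a) = False := by
            apply eq_false; rintro ⟨-, h⟩; omega
          have e2 : (b < (lst.headD []).length ∧ a < a + 1) = True := by
            apply eq_true; exact ⟨hbC, by omega⟩
          simp only [e1, e2, if_false, if_true]
          by_cases hf : f1 lst a b = "-"
          · rw [if_pos ⟨trivial, hbC, ha, hb, hf⟩, if_pos hf]
          · rw [if_neg (by rintro ⟨-, -, -, -, h⟩; exact hf h), if_neg hf]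
        · have e3 : (b < (lst.headD []).length ∧ a < n) = (b < (lst.headD []).length ∧ a < n + 1) := by
            apply propext; constructor <;> rintro ⟨h1, h2⟩ <;> exact ⟨h1, by omega⟩
          simp only [e3]
          rw [if_neg (by rintro ⟨h1, -⟩; exact han h1)]
      · have e4 : (b < (lst.headD []).length ∧ a < n) = False := by
          apply eq_false; rintro ⟨h1, -⟩; exact hbC h1
        have e5 : (b < (lst.headD []).length ∧ a < n + 1) = False := by
          apply eq_false; rintro ⟨h1, -⟩; exact hbC h1
        simp only [e4, e5, if_false]
        rw [if_neg (by rintro ⟨-, h1, -⟩; exact hbC h1)]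

theorem num_grid_eq_stage2 (lst : List (List String)) :
    num_grid lst = stage2 lst lst.length := by
  have hs1 : (PySem.Dict.counter (keyL lst)).items.foldl
      (fun g kv => pyUpd g kv.1.1 kv.1.2 (PySem.Int.toStr kv.2)) lst = stage1 lst := by
    unfold stage1 pfold
    rw [List.foldl_map]
  have hrowp : ∀ (g : List (List String)) (m : Nat),
      (PySem.List.pyRange 0 (((lst.headD []).length : Nat) : Int) 1).foldl
        (fun g b => if pyRd g (m : Int) b = "-" then pyUpd g (m : Int) b "0" else g) g
      = rowpass g m (lst.headD []).length := by
    intro g m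
    rw [PySem.List.pyRange_zero_natCast, List.foldl_map]
    unfold rowpass
    have hfn : (fun (g : List (List String)) (k : Nat) =>
        if pyRd g (m : Int) (k : Int) = "-" then pyUpd g (m : Int) (k : Int) "0" else g)
        = (fun g b => if cellD g m b = "-" then updN g m b "0" else g) := by
      funext g k
      rw [pyRd_natCast, pyUpd_natCast]
    rw [hfn]
  have hcp : ∀ g : List (List String),
      (checkL lst).foldl (fun g t => pyUpd g t.1 t.2 "#") g
      = pfold ((checkL lst).map (fun t => (t, "#"))) g := by
    intro g
    unfold pfold
    rw [List.foldl_map]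
  have hloop : (PySem.List.pyRange 0 (lst.length : Int) 1).foldl
      (fun g a => (checkL lst).foldl (fun g t => pyUpd g t.1 t.2 "#")
        ((PySem.List.pyRange 0 (((lst.headD []).length : Nat) : Int) 1).foldl
          (fun g b => if pyRd g a b = "-" then pyUpd g a b "0" else g) g)) (stage1 lst)
      = stage2 lst lst.length := by
    rw [PySem.List.pyRange_zero_natCast lst.length, List.foldl_map]
    unfold stage2
    have hfn2 : (fun (g : List (List String)) (k : Nat) =>
        (checkL lst).foldl (fun g t => pyUpd g t.1 t.2 "#")
          ((PySem.List.pyRange 0 (((lst.headD []).length : Nat) : Int) 1).foldl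
            (fun g b => if pyRd g (k : Int) b = "-" then pyUpd g (k : Int) b "0" else g) g))
        = (fun g a => apass lst g a) := by
      funext g k
      rw [hrowp g k, hcp]
      rfl
    rw [hfn2]
  unfold num_grid
  simp only [check_eq lst, d_eq lst]
  rw [hs1]
  exact hloop

-- ---------- B-side helpers ----------
def wB (lst : List (List String)) (C a : Nat) (row : List String) (k : Nat) : Option String :=
  if row.getD k "" = "#" then none
  else if nbCount lst (lst.length : Int) ((C : Nat) : Int) (a : Int) (k : Int) ≠ 0 then
    some (PySem.Int.toStr (nbCount lst (lst.length : Int) ((C : Nat) : Int) (a : Int) (k : Int)))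
  else if row.getD k "" = "-" then some "0" else none

def wfold (C : Nat) (row : List String) (w : Nat → Option String) : List String :=
  (List.range C).foldl (fun nr c => match w c with | some v => nr.set c v | none => nr) row

theorem length_wfold (C : Nat) (row : List String) (w : Nat → Option String) :
    (wfold C row w).length = row.length := by
  induction C with
  | zero => rfl
  | succ n ih =>
    rw [wfold, List.range_succ, List.foldl_append, ← wfold, List.foldl_cons, List.foldl_nil]
    cases w n <;> simp [ih]

theorem getElem?_wfold (C : Nat) (row : List String) (w : Nat → Option String) (k : Nat) :
    (wfold C row w)[k]? =
      if k < C ∧ k < row.length then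
        (match w k with | some v => some v | none => row[k]?)
      else row[k]? := by
  induction C generalizing k with
  | zero =>
    rw [wfold, List.range_zero, List.foldl_nil, if_neg]
    rintro ⟨h0, -⟩; omega
  | succ n ih =>
    rw [wfold, List.range_succ, List.foldl_append, ← wfold, List.foldl_cons, List.foldl_nil]
    have hlen := length_wfold n row w
    by_cases hk : k = n
    · subst hk
      have hfold := ih k
      rw [if_neg (by rintro ⟨h0, -⟩; omega)] at hfold
      cases hw : w k with
      | none => simp only [hfold, ite_self]
      | some v =>
        rw [List.getElem?_set, if_pos rfl, hlen]
        by_cases hkr : k < row.length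
        · rw [if_pos hkr, if_pos ⟨by omega, hkr⟩]
        · rw [if_neg hkr, if_neg (by rintro ⟨-, h1⟩; exact hkr h1)]
          exact (List.getElem?_eq_none (by omega)).symm
    · have hne : ¬ n = k := fun h => hk h.symm
      have step_eq : (match w n with
          | some v => (wfold n row w).set n v
          | none => wfold n row w)[k]? = (wfold n row w)[k]? := by
        cases w n with
        | none => rfl
        | some v => rw [List.getElem?_set, if_neg hne]
      rw [step_eq, ih k]
      by_cases hc : k < n ∧ k < row.length
      · rw [if_pos hc, if_pos ⟨by omega, hc.2⟩]
      · rw [if_neg hc, if_neg (by rintro ⟨h1, h2⟩; exact hc ⟨by omega, h2⟩)]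

-- ---------- B characterization ----------
theorem alt_eq (lst : List (List String)) (h : lst ≠ []) :
    num_grid_alt lst = (PySem.List.enumerate lst 0).map (fun p =>
      wfold (lst.headD []).length p.2 (wB lst (lst.headD []).length p.1.toNat p.2)) := by
  unfold num_grid_alt
  simp only [ne_eq, h, not_false_eq_true, if_true]
  rw [PySem.List.foldl_append_singleton_eq_map, List.nil_append]
  apply List.map_congr_left
  intro p hp
  rcases (PySem.List.mem_enumerate_iff _ _ _).mp hp with ⟨k, hk, rfl⟩
  simp only [zero_add, Int.toNat_natCast]
  rw [PySem.List.pyRange_zero_natCast, List.foldl_map]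
  unfold wfold
  have hfn : (fun (nr : List String) (c : Nat) =>
      if PySem.List.pyGetD lst[k] (c : Int) "" = "#" then nr
      else if nbCount lst (lst.length : Int) (((lst.headD []).length : Nat) : Int) ((k : Nat) : Int) (c : Int) ≠ 0 then
        PySem.List.pySetD nr (c : Int)
          (PySem.Int.toStr (nbCount lst (lst.length : Int) (((lst.headD []).length : Nat) : Int) ((k : Nat) : Int) (c : Int)))
      else if PySem.List.pyGetD lst[k] (c : Int) "" = "-" then PySem.List.pySetD nr (c : Int) "0" else nr)
      = (fun nr c =>
        match wB lst (lst.headD []).length k lst[k] c with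
        | some v => nr.set c v
        | none => nr) := by
    funext nr c
    unfold wB
    rw [PySem.List.pyGetD_natCast, PySem.List.pySetD_natCast, PySem.List.pySetD_natCast]
    split_ifs <;> rfl
  rw [hfn]

theorem num_grid_alt_length (lst : List (List String)) :
    (num_grid_alt lst).length = lst.length := by
  by_cases h : lst = []
  · subst h; rfl
  · rw [alt_eq lst h, List.length_map, PySem.List.length_enumerate]

theorem num_grid_alt_rowlen (lst : List (List String)) (k : Nat) :
    ((num_grid_alt lst).getD k []).length = ((lst.getD k []).length) := by
  by_cases h : lst = []
  · subst h; rfl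
  · rw [alt_eq lst h]
    by_cases hk : k < lst.length
    · have he : (PySem.List.enumerate lst 0)[k]? = some ((k : Int), lst[k]) := by
        rw [PySem.List.getElem?_enumerate, List.getElem?_eq_getElem hk]
        simp
      rw [List.getD_eq_getElem?_getD, List.getElem?_map, he]
      simp only [Option.map_some, Option.getD_some, Int.toNat_natCast]
      rw [length_wfold, List.getD_eq_getElem?_getD, List.getElem?_eq_getElem hk]
      rfl
    · have h1 : (List.map (fun p => wfold (lst.headD []).length p.2
          (wB lst (lst.headD []).length p.1.toNat p.2)) (PySem.List.enumerate lst 0))[k]? = none := by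
        apply List.getElem?_eq_none
        rw [List.length_map, PySem.List.length_enumerate]; omega
      rw [List.getD_eq_getElem?_getD, h1, List.getD_eq_getElem?_getD,
        List.getElem?_eq_none (by omega)]

theorem cellD_num_grid_alt (lst : List (List String)) (a b : Nat) (hPre : Pre_num_grid lst)
    (ha : a < lst.length) (hb : b < (lst.getD a []).length) :
    cellD (num_grid_alt lst) a b =
      (if b < (lst.headD []).length ∧ cellD lst a b ≠ "#" then
        (if cntA lst a b ≠ 0 then PySem.Int.toStr (cntA lst a b)
         else if cellD lst a b = "-" then "0" else cellD lst a b)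
       else cellD lst a b) := by
  have hnil : lst ≠ [] := by intro h; subst h; simp at ha
  have hrowa : lst.getD a [] = lst[a] := by
    rw [List.getD_eq_getElem?_getD, List.getElem?_eq_getElem ha]
    rfl
  rw [alt_eq lst hnil]
  have he : (PySem.List.enumerate lst 0)[a]? = some ((a : Int), lst[a]) := by
    rw [PySem.List.getElem?_enumerate, List.getElem?_eq_getElem ha]
    simp
  have hrow' : (List.map (fun p => wfold (lst.headD []).length p.2
        (wB lst (lst.headD []).length p.1.toNat p.2)) (PySem.List.enumerate lst 0)).getD a []
      = wfold (lst.headD []).length lst[a] (wB lst (lst.headD []).length a lst[a]) := by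
    rw [List.getD_eq_getElem?_getD, List.getElem?_map, he]
    simp only [Option.map_some, Option.getD_some, Int.toNat_natCast]
  conv_lhs => rw [cellD, hrow']
  rw [List.getD_eq_getElem?_getD, getElem?_wfold]
  have hbrow : b < lst[a].length := by rw [← hrowa]; exact hb
  have hcell : lst[a].getD b "" = cellD lst a b := by
    rw [cellD, hrowa]
  have hgb : lst[a][b] = cellD lst a b := by
    rw [← hcell, List.getD_eq_getElem?_getD, List.getElem?_eq_getElem hbrow, Option.getD_some]
  by_cases hbC : b < (lst.headD []).length
  · rw [if_pos ⟨hbC, hbrow⟩]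
    by_cases hH : cellD lst a b = "#"
    · have hw : wB lst (lst.headD []).length a lst[a] b = none := by
        unfold wB; rw [hcell, if_pos hH]
      simp only [hw]
      rw [List.getElem?_eq_getElem hbrow, Option.getD_some,
        if_neg (by rintro ⟨-, hcc⟩; exact hcc hH)]
      exact hgb
    · by_cases hcnt : cntA lst a b ≠ 0
      · have hw : wB lst (lst.headD []).length a lst[a] b
            = some (PySem.Int.toStr ((cntA lst a b : Nat) : Int)) := by
          unfold wB
          rw [hcell, if_neg hH, nbCount_eq_cntA lst a b ha hbC,
            if_pos (by exact_mod_cast hcnt : ((cntA lst a b : Nat) : Int) ≠ 0)]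
        simp only [hw, Option.getD_some]
        rw [if_pos ⟨hbC, hH⟩, if_pos hcnt]
      · have hw : wB lst (lst.headD []).length a lst[a] b
            = if cellD lst a b = "-" then some "0" else none := by
          unfold wB
          rw [hcell, if_neg hH, nbCount_eq_cntA lst a b ha hbC,
            if_neg (by simpa using hcnt : ¬ ((cntA lst a b : Nat) : Int) ≠ 0)]
        by_cases hdash : cellD lst a b = "-"
        · rw [if_pos hdash] at hw
          simp only [hw, Option.getD_some]
          rw [if_pos ⟨hbC, hH⟩, if_neg hcnt, if_pos hdash]
        · rw [if_neg hdash] at hw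
          simp only [hw]
          rw [List.getElem?_eq_getElem hbrow, Option.getD_some, if_pos ⟨hbC, hH⟩,
            if_neg hcnt, if_neg hdash]
          exact hgb
  · rw [if_neg (by rintro ⟨h1, -⟩; exact hbC h1), if_neg (by rintro ⟨h1, -⟩; exact hbC h1),
      List.getElem?_eq_getElem hbrow, Option.getD_some]
    exact hgb

-- ===== VERDICT (by name: the statement is the Claim_ definition above) =====
theorem num_grid_spec : Claim_equal_num_grid := by
  intro lst _hdom hPre
  unfold Spec_num_grid
  rw [num_grid_eq_stage2]
  have hlenA : (stage2 lst lst.length).length = lst.length := length_stage2 lst lst.length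
  have hlenB : (num_grid_alt lst).length = lst.length := num_grid_alt_length lst
  apply List.ext_getElem (by rw [hlenA, hlenB])
  intro a ha1 ha2
  have haR : a < lst.length := by rw [hlenA] at ha1; exact ha1
  have hrEq : ∀ (g : List (List String)) (h : a < g.length), g[a] = g.getD a [] := by
    intro g h
    rw [List.getD_eq_getElem?_getD, List.getElem?_eq_getElem h]
    rfl
  have hrowA : ((stage2 lst lst.length).getD a []).length = (lst.getD a []).length :=
    rowlen_stage2 lst lst.length a
  have hrowB : ((num_grid_alt lst).getD a []).length = (lst.getD a []).length :=
    num_grid_alt_rowlen lst a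
  apply List.ext_getElem (by rw [hrEq _ ha1, hrEq _ ha2, hrowA, hrowB])
  intro b hb1 hb2
  have hbR : b < (lst.getD a []).length := by
    rw [hrEq _ ha1, hrowA] at hb1
    exact hb1
  have hcellA : (stage2 lst lst.length)[a][b] = cellD (stage2 lst lst.length) a b := by
    rw [cellD, ← hrEq _ ha1, List.getD_eq_getElem?_getD, List.getElem?_eq_getElem hb1]
    rfl
  have hcellB : (num_grid_alt lst)[a][b] = cellD (num_grid_alt lst) a b := by
    rw [cellD, ← hrEq _ ha2, List.getD_eq_getElem?_getD, List.getElem?_eq_getElem hb2]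
    rfl
  rw [hcellA, hcellB, cellD_stage2 lst lst.length a b hPre haR hbR,
    cellD_num_grid_alt lst a b hPre haR hbR]
  unfold Fm
  by_cases hbC : b < (lst.headD []).length
  · by_cases hH : cellD lst a b = "#"
    · rw [if_pos ⟨hbC, by omega, hH⟩,
        if_neg (show ¬(b < (lst.headD []).length ∧ cellD lst a b ≠ "#") from
          fun hx => hx.2 hH), hH]
    · rw [if_neg (show ¬(b < (lst.headD []).length ∧ 0 < lst.length ∧ cellD lst a b = "#") from
          fun hx => hH hx.2.2), if_pos ⟨hbC, haR, hH⟩]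
      conv_rhs => rw [if_pos ⟨hbC, hH⟩]
      unfold f1
      by_cases hcnt : cntA lst a b ≠ 0
      · rw [if_pos (show b < (lst.headD []).length ∧ cntA lst a b ≠ 0 from ⟨hbC, hcnt⟩), if_pos hcnt,
          if_neg (toStr_ne_dash (cntA lst a b) hcnt (cntA_le_nine lst a b haR hbC))]
      · rw [if_neg (show ¬(b < (lst.headD []).length ∧ cntA lst a b ≠ 0) from
          fun hx => hcnt hx.2), if_neg hcnt]
  · rw [if_neg (show ¬(b < (lst.headD []).length ∧ 0 < lst.length ∧ cellD lst a b = "#") from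
        fun hx => hbC hx.1),
      if_neg (show ¬(b < (lst.headD []).length ∧ a < lst.length ∧ cellD lst a b ≠ "#") from
        fun hx => hbC hx.1),
      if_neg (show ¬(b < (lst.headD []).length ∧ cellD lst a b ≠ "#") from
        fun hx => hbC hx.1)]
    unfold f1
    rw [if_neg (show ¬(b < (lst.headD []).length ∧ cntA lst a b ≠ 0) from
        fun hx => hbC hx.1)]
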